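-- pv_equiv track=rewrite | github.com/fledit-sh/glacium-repo | run_MULTISHOT/01_auto_cp_normals.py | iter_zones
-- ===== SOURCE A (Python) =====
-- from typing import List, Optional, Tuple, Dict
--
-- def iter_zones(lines: List[str]) -> List[Tuple[int,int,str]]:
--     starts = [i for i, ln in enumerate(lines) if ln.strip().upper().startswith("ZONE")]
--     starts.append(len(lines))
--     zones = []
--     for s, e in zip(starts, starts[1:]):
--         header = " ".join(lines[s:e][:5])
--         zones.append((s, e, header))
--     return zones
-- ===== SOURCE B (Python) =====
-- from typing import List, Tuple
--
-- def iter_zones(lines: List[str]) -> List[Tuple[int, int, str]]: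
--     zones = []
--     open_start = None
--     for i, ln in enumerate(lines):
--         if ln.strip().upper().startswith("ZONE"):
--             if open_start is not None:
--                 zones.append((open_start, i, " ".join(lines[open_start:i][:5])))
--             open_start = i
--     if open_start is not None:
--         n = len(lines)
--         zones.append((open_start, n, " ".join(lines[open_start:n][:5])))
--     return zones
-- ===== Notes on version B (the rewrite author's own statement) =====
-- stated objective: alternative
-- what changed: Replaced A's two-phase approach (build the full list of ZONE start indices, then zip it with its shifted self and map over the pairs) by a single enumerated pass that keeps only the currently open zone's start index and emits each zone when the next ZONE line (or the end of input) is reached.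
import Mathlib
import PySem

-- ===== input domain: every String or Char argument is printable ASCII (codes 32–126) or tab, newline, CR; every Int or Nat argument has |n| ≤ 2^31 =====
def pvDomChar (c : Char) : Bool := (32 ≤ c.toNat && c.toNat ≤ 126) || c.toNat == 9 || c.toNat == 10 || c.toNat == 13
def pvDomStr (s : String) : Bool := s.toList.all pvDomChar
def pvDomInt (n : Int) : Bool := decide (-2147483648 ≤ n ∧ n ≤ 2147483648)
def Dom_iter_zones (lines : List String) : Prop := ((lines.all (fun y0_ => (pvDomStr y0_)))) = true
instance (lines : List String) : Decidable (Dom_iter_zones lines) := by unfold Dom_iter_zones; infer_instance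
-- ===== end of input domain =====

-- B replaces A's two-phase starts-list + zip pairing by a single enumerated pass
-- that tracks only the currently open zone's start (objective: alternative decomposition).

-- shared helpers: the zone predicate 'ln.strip().upper().startswith("ZONE")' and
-- the header expression '" ".join(lines[s:e][:5])' appearing verbatim in both pythons
def pvIsZone (ln : String) : Bool :=
  PySem.Str.startswith (PySem.Str.upper (PySem.Str.strip ln)) "ZONE"

def pvHdr (lines : List String) (s e : Int) : String :=
  PySem.Str.join " " (PySem.List.slice (PySem.List.slice lines (some s) (some e)) none (some 5))

-- ===== PORT A =====
def iter_zones (lines : List String) : List (Int × Int × String) :=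
  let starts : List Int :=
    (((PySem.List.enumerate lines 0).filter (fun p => pvIsZone p.2)).map (fun p => p.1))
      ++ [(lines.length : Int)]
  (starts.zip starts.tail).map (fun p => (p.1, p.2, pvHdr lines p.1 p.2))

-- ===== PORT B =====
-- loop body of B's single pass: state = (zones so far, optional open zone start)
def pvStep (lines : List String) (st : List (Int × Int × String) × Option Int)
    (p : Int × String) : List (Int × Int × String) × Option Int :=
  if pvIsZone p.2 then
    (match st.2 with
     | some s => st.1 ++ [(s, p.1, pvHdr lines s p.1)]
     | none => st.1, some p.1)
  else st

def iter_zones_alt (lines : List String) : List (Int × Int × String) :=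
  match (PySem.List.enumerate lines 0).foldl (pvStep lines) ([], none) with
  | (zones, some s) => zones ++ [(s, (lines.length : Int), pvHdr lines s (lines.length : Int))]
  | (zones, none) => zones

-- ===== PRECONDITION & SPEC =====
def Spec_iter_zones (lines : List String) (out : List (Int × Int × String)) : Prop := out = iter_zones_alt lines
instance (lines : List String) (out : List (Int × Int × String)) : Decidable (Spec_iter_zones lines out) := by unfold Spec_iter_zones; infer_instance

-- ===== CLAIM (what is proved, stated in full; the proofs are below) =====
def Claim_equal_iter_zones : Prop := ∀ (lines : List String), Dom_iter_zones lines → Spec_iter_zones lines (iter_zones lines)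

-- ===== LEMMAS AND PROOFS =====

-- A's pairing of consecutive starts, abstracted over the starts list
def pvPairs (lines : List String) (l : List Int) : List (Int × Int × String) :=
  (l.zip l.tail).map (fun p => (p.1, p.2, pvHdr lines p.1 p.2))

-- B's finalisation step, abstracted
def pvFin (lines : List String) (st : List (Int × Int × String) × Option Int) :
    List (Int × Int × String) :=
  match st with
  | (zones, some s) => zones ++ [(s, (lines.length : Int), pvHdr lines s (lines.length : Int))]
  | (zones, none) => zones

theorem pvPairs_cons_cons (lines : List String) (a b : Int) (r : List Int) :
    pvPairs lines (a :: b :: r) = (a, b, pvHdr lines a b) :: pvPairs lines (b :: r) := by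
  simp [pvPairs]

theorem pvStep_neg (lines : List String) (st : List (Int × Int × String) × Option Int)
    (p : Int × String) (hz : ¬ pvIsZone p.2 = true) : pvStep lines st p = st := by
  simp [pvStep, hz]

theorem pvStep_pos_none (lines : List String) (z : List (Int × Int × String))
    (p : Int × String) (hz : pvIsZone p.2 = true) :
    pvStep lines (z, none) p = (z, some p.1) := by
  simp [pvStep, hz]

theorem pvStep_pos_some (lines : List String) (z : List (Int × Int × String)) (s : Int)
    (p : Int × String) (hz : pvIsZone p.2 = true) :
    pvStep lines (z, some s) p = (z ++ [(s, p.1, pvHdr lines s p.1)], some p.1) := by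
  simp [pvStep, hz]

theorem pvFoldl_acc (lines : List String) (L : List (Int × String))
    (acc : List (Int × Int × String)) (o : Option Int) :
    L.foldl (pvStep lines) (acc, o)
      = (acc ++ (L.foldl (pvStep lines) ([], o)).1, (L.foldl (pvStep lines) ([], o)).2) := by
  induction L generalizing acc o with
  | nil => simp
  | cons p L ih =>
    simp only [List.foldl_cons]
    by_cases hz : pvIsZone p.2
    · cases o with
      | none =>
        rw [pvStep_pos_none lines acc p hz, pvStep_pos_none lines [] p hz]
        exact ih acc (some p.1)
      | some s =>
        rw [pvStep_pos_some lines acc s p hz, pvStep_pos_some lines [] s p hz]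
        simp only [List.nil_append]
        rw [ih (acc ++ [(s, p.1, pvHdr lines s p.1)]) (some p.1),
            ih [(s, p.1, pvHdr lines s p.1)] (some p.1)]
        rw [List.append_assoc]
    · rw [pvStep_neg lines (acc, o) p hz, pvStep_neg lines ([], o) p hz]
      exact ih acc o

theorem pvFin_main (lines : List String) (L : List (Int × String)) (o : Option Int) :
    pvFin lines (L.foldl (pvStep lines) ([], o))
      = pvPairs lines (o.toList ++ (L.filter (fun p => pvIsZone p.2)).map (fun p => p.1)
          ++ [(lines.length : Int)]) := by
  induction L generalizing o with
  | nil =>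
    cases o with
    | none => simp [pvFin, pvPairs]
    | some s => simp [pvFin, pvPairs]
  | cons p L ih =>
    simp only [List.foldl_cons]
    by_cases hz : pvIsZone p.2
    · cases o with
      | none =>
        rw [pvStep_pos_none lines [] p hz, ih (some p.1)]
        simp [hz]
      | some s =>
        rw [pvStep_pos_some lines [] s p hz]
        simp only [List.nil_append]
        rw [pvFoldl_acc lines L [(s, p.1, pvHdr lines s p.1)] (some p.1)]
        have hfin : ∀ (z : List (Int × Int × String)) (o2 : Option Int)
            (x : Int × Int × String),
            pvFin lines (x :: z, o2) = x :: pvFin lines (z, o2) := by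
          intro z o2 x; cases o2 <;> simp [pvFin]
        have hih := ih (some p.1)
        rcases h : L.foldl (pvStep lines) ([], some p.1) with ⟨z, o2⟩
        rw [h] at hih
        simp only [List.singleton_append, hfin z o2]
        rw [hih]
        simp [hz, pvPairs_cons_cons]
    · rw [pvStep_neg lines ([], o) p hz, ih o]
      simp [hz]

theorem iter_zones_eq_alt (lines : List String) :
    iter_zones lines = iter_zones_alt lines := by
  have halt : iter_zones_alt lines
      = pvFin lines ((PySem.List.enumerate lines 0).foldl (pvStep lines) ([], none)) := by
    unfold iter_zones_alt pvFin
    rcases (PySem.List.enumerate lines 0).foldl (pvStep lines) ([], none) with ⟨z, o⟩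
    cases o <;> rfl
  rw [halt, pvFin_main lines (PySem.List.enumerate lines 0) none]
  simp [iter_zones, pvPairs]

-- ===== VERDICT (by name: the statement is the Claim_ definition above) =====
theorem iter_zones_spec : Claim_equal_iter_zones := by
  intro lines _
  unfold Spec_iter_zones
  exact iter_zones_eq_alt lines
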